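-- pv_equiv track=rewrite | github.com/adjcjh777/lark_ai_challenge_openclaw_longterm_memory | memory_engine/feishu_runtime.py | _redact_command
-- ===== SOURCE A (Python) =====
-- def _redact_command(command: list[str]) -> list[str]:
--     redacted: list[str] = []
--     skip_next = False
--     for item in command:
--         if skip_next:
--             redacted.append("[REDACTED]")
--             skip_next = False
--             continue
--         redacted.append(item)
--         if item in {"--app-secret", "--secret", "--token"}:
--             skip_next = True
--     return redacted
-- ===== SOURCE B (Python) =====
-- def _redact_command(command: list[str]) -> list[str]:
--     flags = {"--app-secret", "--secret", "--token"}
--     out: list[str] = []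
--     i = 0
--     n = len(command)
--     while i < n:
--         item = command[i]
--         out.append(item)
--         if item in flags and i + 1 < n:
--             out.append("[REDACTED]")
--             i += 2
--         else:
--             i += 1
--     return out
-- ===== Notes on version B (the rewrite author's own statement) =====
-- stated objective: alternative
-- what changed: B replaces A's one-item-at-a-time skip_next state machine with a stateless while loop that consumes a flag together with its following value in one step (advancing by 2), so no boolean carry-over between iterations exists.
import Mathlib
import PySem

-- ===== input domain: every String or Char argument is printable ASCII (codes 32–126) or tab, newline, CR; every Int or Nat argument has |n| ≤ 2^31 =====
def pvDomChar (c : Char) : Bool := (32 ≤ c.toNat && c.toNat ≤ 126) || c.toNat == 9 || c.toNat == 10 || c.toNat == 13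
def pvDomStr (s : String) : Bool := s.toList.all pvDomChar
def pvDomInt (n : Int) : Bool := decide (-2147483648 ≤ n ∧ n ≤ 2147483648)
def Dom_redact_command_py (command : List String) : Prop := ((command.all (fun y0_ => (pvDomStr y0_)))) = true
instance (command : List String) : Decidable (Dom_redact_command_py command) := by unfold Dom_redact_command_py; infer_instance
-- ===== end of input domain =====

-- B consumes a secret flag together with its following value in one step (no skip_next state);
-- proved equal to A's skip_next state machine on all inputs.
-- ===== PORT A =====
-- the Python for-loop with state (redacted, skip_next), as structural recursion on the remaining items
def pvALoop (xs : List String) (redacted : List String) (skip_next : Bool) : List String :=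
  match xs with
  | [] => redacted
  | item :: rest =>
    if skip_next then pvALoop rest (redacted ++ ["[REDACTED]"]) false
    else pvALoop rest (redacted ++ [item])
      (item == "--app-secret" || item == "--secret" || item == "--token")

def redact_command_py (command : List String) : List String :=
  pvALoop command [] false

-- ===== PORT B =====
-- Source B's while loop over index i advancing by 1 or 2 = recursion on the remaining suffix command[i:]
def redact_command_py_alt (command : List String) : List String :=
  match command with
  | [] => []
  | item :: rest =>
    if item == "--app-secret" || item == "--secret" || item == "--token" then
      match rest with
      | [] => [item]                                        -- i + 1 < n fails
      | _ :: rest' => item :: "[REDACTED]" :: redact_command_py_alt rest'  -- i += 2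
    else item :: redact_command_py_alt rest

-- ===== PRECONDITION & SPEC =====
def Spec_redact_command_py (command : List String) (out : List String) : Prop := out = redact_command_py_alt command
instance (command : List String) (out : List String) : Decidable (Spec_redact_command_py command out) := by unfold Spec_redact_command_py; infer_instance

-- ===== CLAIM (what is proved, stated in full; the proofs are below) =====
def Claim_equal_redact_command_py : Prop := ∀ (command : List String), Dom_redact_command_py command → Spec_redact_command_py command (redact_command_py command)

-- ===== LEMMAS AND PROOFS =====

-- ===== VERDICT (by name: the statement is the Claim_ definition above) =====
-- the accumulator of A's loop factors out
theorem pvALoop_acc (xs : List String) (acc : List String) (skip : Bool) :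
    pvALoop xs acc skip = acc ++ pvALoop xs [] skip := by
  induction xs generalizing acc skip with
  | nil => simp [pvALoop]
  | cons x rest ih =>
    simp only [pvALoop]
    split_ifs
    · rw [ih (acc ++ ["[REDACTED]"]), ih ([] ++ ["[REDACTED]"])]; simp
    · rw [ih (acc ++ [x]), ih ([] ++ [x])]; simp

theorem pvALoop_eq_alt (xs : List String) :
    pvALoop xs [] false = redact_command_py_alt xs := by
  induction xs using redact_command_py_alt.induct with
  | case1 => rfl
  | case2 item h =>
    simp [pvALoop, redact_command_py_alt]
  | case3 item h y rest' ih =>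
    simp only [pvALoop, Bool.false_eq_true, if_false, List.nil_append, h, if_true]
    rw [pvALoop_acc]
    simp [redact_command_py_alt, h, ih]
  | case4 item rest h ih =>
    have hf : (item == "--app-secret" || item == "--secret" || item == "--token") = false :=
      Bool.eq_false_iff.mpr h
    simp only [pvALoop, Bool.false_eq_true, if_false, List.nil_append, hf]
    rw [pvALoop_acc, ih]
    conv_rhs => rw [redact_command_py_alt.eq_def]
    simp [hf]

theorem redact_command_py_spec : Claim_equal_redact_command_py := by
  intro command _
  unfold Spec_redact_command_py redact_command_py
  exact pvALoop_eq_alt command
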